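-- pv_equiv track=rewrite | github.com/Sudhansan5/InterviewBit-Solution-Python | Maths/Maths II/subsequence_divisible_by_b.py | Solve
-- ===== SOURCE A (Python) =====
-- def Solve(A,B):
--     mod = 1000000007
--     n=len(A)
--     freq=[0 for _ in range(B)]
--     for i in range(n):
--         A[i] %= B
--         freq[A[i]] += 1
--     ans = 0
--
--     for i in range(B):
--         for j in range(i,B):
--             rem = (B - (i+j)%B)%B
--
--             if rem < j:
--                 continue
--
--             if i == j and rem == j:
--                 ans += freq[i] * (freq[i] - 1) * (freq[i] - 2) // 6
--
--             elif i == j: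
--                 ans += freq[i] * (freq[i]-1) * freq[rem] // 2
--
--             elif i == rem:
--                 ans + freq[i] * (freq[i] - 1) * freq[j] // 2
--
--             elif j == rem:
--                 ans += freq[j] * (freq[j] - 1) * freq[i] // 2
--
--             else:
--                 ans += freq[i] * freq[j] * freq[rem]
--
--     return ans%mod
-- ===== SOURCE B (Python) =====
-- def Solve(A, B):
--     mod = 1000000007
--     freq = [0] * B
--     for a in A:
--         freq[a % B] += 1
--     T = 0
--     U = 0
--     V = 0
--     for r in range(B):
--         fr = freq[r]
--         for s in range(B):
--             T += fr * freq[s] * freq[(-(r + s)) % B]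
--         U += fr * freq[(-2 * r) % B]
--         if (3 * r) % B == 0:
--             V += fr
--     return ((T - 3 * U + 2 * V) // 6) % mod
-- ===== Notes on version B (the rewrite author's own statement) =====
-- stated objective: alternative
-- what changed: Replaces A's case analysis over sorted residue pairs (with per-class binomial branches and a skip test) by an unrestricted self-convolution of the residue histogram plus inclusion-exclusion for repeated indices: ans = (T - 3U + 2V)/6 with T the full ordered triple sum, U the ordered pairs with a doubled residue, V the triple-equal residues.
import Mathlib
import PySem

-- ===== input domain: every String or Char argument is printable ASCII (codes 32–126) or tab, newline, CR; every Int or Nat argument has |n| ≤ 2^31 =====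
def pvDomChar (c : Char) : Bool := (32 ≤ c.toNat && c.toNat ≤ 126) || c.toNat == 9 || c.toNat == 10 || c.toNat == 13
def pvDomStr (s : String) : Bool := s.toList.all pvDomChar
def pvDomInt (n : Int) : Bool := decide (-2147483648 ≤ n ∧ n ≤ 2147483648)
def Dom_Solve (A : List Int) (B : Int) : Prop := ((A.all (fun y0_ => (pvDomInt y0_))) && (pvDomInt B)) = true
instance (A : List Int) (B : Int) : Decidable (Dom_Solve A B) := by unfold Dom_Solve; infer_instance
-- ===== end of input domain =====

-- B replaces A's sorted-residue-pair case analysis by a full self-convolution of the residue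
-- histogram plus inclusion–exclusion ((T - 3U + 2V) // 6); equivalence is about the RETURN value
-- only: Python A mutates its list argument (A[i] %= B), B does not.

-- ===== PORT A =====
-- rem = (B - (i+j)%B)%B
def solveRem (B i j : Int) : Int := PySem.Int.mod (B - PySem.Int.mod (i + j) B) B

-- body of A's inner j-loop (the 'continue' and the dead 'ans + …' line keep ans unchanged)
def solveInner (B : Int) (freq : List Int) (i ans j : Int) : Int :=
  if solveRem B i j < j then ans
  else if i = j ∧ solveRem B i j = j then
    ans + PySem.Int.floordiv (PySem.List.pyGetD freq i 0 * (PySem.List.pyGetD freq i 0 - 1) *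
      (PySem.List.pyGetD freq i 0 - 2)) 6
  else if i = j then
    ans + PySem.Int.floordiv (PySem.List.pyGetD freq i 0 * (PySem.List.pyGetD freq i 0 - 1) *
      PySem.List.pyGetD freq (solveRem B i j) 0) 2
  else if i = solveRem B i j then
    ans  -- Python line reads 'ans + …' with no assignment: the expression is discarded
  else if j = solveRem B i j then
    ans + PySem.Int.floordiv (PySem.List.pyGetD freq j 0 * (PySem.List.pyGetD freq j 0 - 1) *
      PySem.List.pyGetD freq i 0) 2
  else
    ans + PySem.List.pyGetD freq i 0 * PySem.List.pyGetD freq j 0 *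
      PySem.List.pyGetD freq (solveRem B i j) 0

-- body of A's first loop: A[i] %= B; freq[A[i]] += 1  (state = (A, freq))
def solveStep (B : Int) (st : List Int × List Int) (i : Int) : List Int × List Int :=
  (PySem.List.pySetD st.1 i (PySem.Int.mod (PySem.List.pyGetD st.1 i 0) B),
   PySem.List.pySetD st.2 (PySem.Int.mod (PySem.List.pyGetD st.1 i 0) B)
     (PySem.List.pyGetD st.2 (PySem.Int.mod (PySem.List.pyGetD st.1 i 0) B) 0 + 1))

def Solve (A : List Int) (B : Int) : Int :=
  let md : Int := 1000000007
  let n : Int := (A.length : Int)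
  let freq : List Int := (PySem.List.pyRange 0 B 1).map (fun _ => (0 : Int))
  let st := (PySem.List.pyRange 0 n 1).foldl (solveStep B) (A, freq)
  let ans : Int := (PySem.List.pyRange 0 B 1).foldl
    (fun ans i => (PySem.List.pyRange i B 1).foldl (solveInner B st.2 i) ans) 0
  PySem.Int.mod ans md

-- ===== PORT B =====
-- freq[a % B] += 1
def altCount (B : Int) (fr : List Int) (a : Int) : List Int :=
  PySem.List.pySetD fr (PySem.Int.mod a B) (PySem.List.pyGetD fr (PySem.Int.mod a B) 0 + 1)

-- body of B's r-loop over the running (T, U, V) state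
def altStep (B : Int) (freq : List Int) (st : Int × Int × Int) (r : Int) : Int × Int × Int :=
  let fr := PySem.List.pyGetD freq r 0
  let t := (PySem.List.pyRange 0 B 1).foldl
    (fun t s => t + fr * PySem.List.pyGetD freq s 0 *
      PySem.List.pyGetD freq (PySem.Int.mod (-(r + s)) B) 0) st.1
  let u := st.2.1 + fr * PySem.List.pyGetD freq (PySem.Int.mod (-2 * r) B) 0
  let v := if PySem.Int.mod (3 * r) B = 0 then st.2.2 + fr else st.2.2
  (t, u, v)

def Solve_alt (A : List Int) (B : Int) : Int :=
  let md : Int := 1000000007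
  -- [0] * B : empty for B ≤ 0, exactly Python's list repetition
  let freq0 : List Int := List.replicate B.toNat 0
  let freq : List Int := A.foldl (altCount B) freq0
  let st := (PySem.List.pyRange 0 B 1).foldl (altStep B freq) (0, 0, 0)
  PySem.Int.mod (PySem.Int.floordiv (st.1 - 3 * st.2.1 + 2 * st.2.2) 6) md

-- ===== PRECONDITION & SPEC =====
-- A raises for B ≤ 0 on any nonempty list (ZeroDivisionError for B = 0, IndexError for B < 0);
-- Pre_ excludes exactly those inputs and nothing else.
def Pre_Solve (A : List Int) (B : Int) : Prop := 1 ≤ B ∨ A = []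
instance (A : List Int) (B : Int) : Decidable (Pre_Solve A B) := by unfold Pre_Solve; infer_instance
def pvWitness_Solve : List Int × Int := ([2, 3, 1, 4], 3)

def Spec_Solve (A : List Int) (B : Int) (out : Int) : Prop := out = Solve_alt A B
instance (A : List Int) (B : Int) (out : Int) : Decidable (Spec_Solve A B out) := by unfold Spec_Solve; infer_instance

-- ===== CLAIM (what is proved, stated in full; the proofs are below) =====
def Claim_equal_Solve : Prop := ∀ (A : List Int) (B : Int), Dom_Solve A B → Pre_Solve A B → Spec_Solve A B (Solve A B)

-- ===== LEMMAS AND PROOFS =====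

lemma Ico_int_cons {a b : Int} (h : a < b) :
    Finset.Ico a b = insert a (Finset.Ico (a+1) b) := by
  ext x; simp [Finset.mem_Ico, Finset.mem_insert]; omega

lemma sum_pyRange (g : Int → Int) (a b : Int) :
    ((PySem.List.pyRange a b 1).map g).sum = ∑ i ∈ Finset.Ico a b, g i := by
  rcases le_or_gt b a with h | h
  · rw [PySem.List.pyRange_one]
    have h0 : (b - a).toNat = 0 := by omega
    rw [Finset.Ico_eq_empty (by omega)]
    simp [h0]
  · have hn : b = a + ((b - a).toNat : Int) := by omega
    generalize hk : (b - a).toNat = k at *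
    induction k generalizing a with
    | zero => omega
    | succ m ih =>
      rw [PySem.List.pyRange_one_cons (by omega), List.map_cons, List.sum_cons,
        Ico_int_cons h, Finset.sum_insert (by simp)]
      rcases Nat.eq_zero_or_pos m with hm | hm
      · subst hm
        rw [PySem.List.pyRange_one]
        have h0 : (b - (a+1)).toNat = 0 := by omega
        rw [Finset.Ico_eq_empty (by omega)]
        simp [h0]
      · rw [ih (a+1) (by omega) (by omega) (by omega)]

def tf (B i j : Int) : Int := (-(i+j)).emod B

lemma tf_nonneg {B : Int} (hB : 0 < B) (i j : Int) : 0 ≤ tf B i j :=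
  Int.emod_nonneg _ (by omega)

lemma tf_lt {B : Int} (hB : 0 < B) (i j : Int) : tf B i j < B :=
  Int.emod_lt_of_pos _ hB

lemma tf_swap (B i j : Int) : tf B i j = tf B j i := by
  unfold tf; rw [add_comm]

lemma tf_dvd {B : Int} (hB : 0 < B) (i j : Int) : B ∣ (i + j + tf B i j) := by
  unfold tf
  have h := Int.emod_add_mul_ediv (-(i+j)) B
  exact ⟨-((-(i+j)) / B), by linear_combination h⟩

lemma tf_eq_iff {B i j k : Int} (hB : 0 < B) (hk0 : 0 ≤ k) (hkB : k < B) :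
    tf B i j = k ↔ B ∣ (i + j + k) := by
  constructor
  · rintro rfl; exact tf_dvd hB i j
  · intro h
    have h2 := tf_dvd hB i j
    have h3 : B ∣ (tf B i j - k) := by
      have := dvd_sub h2 h
      simpa using this
    have h4 := tf_nonneg hB i j
    have h5 := tf_lt hB i j
    rcases h3 with ⟨c, hc⟩
    have h6 : c = 0 := by
      by_contra hne
      rcases lt_or_gt_of_ne hne with hlt | hgt
      · have : B * c ≤ B * (-1) := mul_le_mul_of_nonneg_left (by omega) hB.le
        omega
      · have : B * 1 ≤ B * c := mul_le_mul_of_nonneg_left (by omega) hB.le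
        omega
    rw [h6, mul_zero] at hc
    omega

lemma tf_rotate {B r s : Int} (hB : 0 < B) (hs0 : 0 ≤ s) (hsB : s < B) :
    tf B (tf B r s) r = s := by
  rw [tf_eq_iff hB hs0 hsB]
  have := tf_dvd hB r s
  rw [show tf B r s + r + s = (r + s + tf B r s) by ring]
  exact this

def pvS (B : Int) : Finset Int :=
  (Finset.range B.toNat).map ⟨fun (n : Nat) => (n : Int), fun a b h => by simpa using h⟩

lemma mem_pvS {B x : Int} : x ∈ pvS B ↔ 0 ≤ x ∧ x < B := by
  unfold pvS
  simp only [Finset.mem_map, Finset.mem_range, Function.Embedding.coeFn_mk]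
  constructor
  · rintro ⟨n, hn, rfl⟩; omega
  · rintro ⟨h1, h2⟩; exact ⟨x.toNat, by omega, by omega⟩

lemma pvS_eq (B : Int) : pvS B = Finset.Ico 0 B := by
  unfold pvS
  ext x
  simp only [Finset.mem_map, Finset.mem_range, Function.Embedding.coeFn_mk, Finset.mem_Ico]
  constructor
  · rintro ⟨n, hn, rfl⟩; omega
  · rintro ⟨h1, h2⟩; exact ⟨x.toNat, by omega, by omega⟩

def pvSq (B : Int) : Finset (Int × Int) := (pvS B) ×ˢ (pvS B)

lemma mem_pvSq {B : Int} {p : Int × Int} :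
    p ∈ pvSq B ↔ (0 ≤ p.1 ∧ p.1 < B) ∧ (0 ≤ p.2 ∧ p.2 < B) := by
  unfold pvSq; rw [Finset.mem_product, mem_pvS, mem_pvS]

def pvG (B : Int) (f : Int → Int) (p : Int × Int) : Int := f p.1 * f p.2 * f (tf B p.1 p.2)

def pvD3 (B : Int) (f : Int → Int) : Int :=
  ∑ p ∈ (pvSq B).filter (fun p => p.1 < p.2 ∧ p.2 < tf B p.1 p.2), pvG B f p
def pvP12 (B : Int) (f : Int → Int) : Int :=
  ∑ r ∈ (pvS B).filter (fun r => r < tf B r r), f r * f r * f (tf B r r)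
def pvQ12 (B : Int) (f : Int → Int) : Int :=
  ∑ r ∈ (pvS B).filter (fun r => r < tf B r r), f r * f (tf B r r)
def pvP23 (B : Int) (f : Int → Int) : Int :=
  ∑ p ∈ (pvSq B).filter (fun p => p.1 < p.2 ∧ tf B p.1 p.2 = p.2), f p.1 * f p.2 * f p.2
def pvQ23 (B : Int) (f : Int → Int) : Int :=
  ∑ p ∈ (pvSq B).filter (fun p => p.1 < p.2 ∧ tf B p.1 p.2 = p.2), f p.1 * f p.2
def pvE3 (B : Int) (f : Int → Int) : Int :=
  ∑ r ∈ (pvS B).filter (fun r => tf B r r = r), f r * f r * f r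
def pvE2 (B : Int) (f : Int → Int) : Int :=
  ∑ r ∈ (pvS B).filter (fun r => tf B r r = r), f r * f r
def pvE1 (B : Int) (f : Int → Int) : Int :=
  ∑ r ∈ (pvS B).filter (fun r => tf B r r = r), f r

-- the r = s diagonal of the square collapses to the scalar diagonal
lemma diag_collapse (B : Int) (f : Int → Int) (F : Int × Int → Int) :
    ∑ p ∈ (pvSq B).filter (fun p => ¬ p.1 < p.2 ∧ ¬ p.2 < p.1), F p
      = ∑ r ∈ pvS B, F (r, r) := by
  refine Finset.sum_nbij' (i := fun p => p.1) (j := fun r => (r, r)) ?_ ?_ ?_ ?_ ?_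
  · intro p hp
    simp only [Finset.mem_filter, mem_pvSq] at hp
    exact mem_pvS.mpr ⟨hp.1.1.1, hp.1.1.2⟩
  · intro r hr
    rw [mem_pvS] at hr
    simp only [Finset.mem_filter, mem_pvSq]
    exact ⟨⟨⟨hr.1, hr.2⟩, ⟨hr.1, hr.2⟩⟩, by omega, by omega⟩
  · intro p hp
    simp only [Finset.mem_filter, mem_pvSq] at hp
    have : p.1 = p.2 := by omega
    ext <;> simp [this]
  · intro r hr; rfl
  · intro p hp
    simp only [Finset.mem_filter, mem_pvSq] at hp
    have : p.1 = p.2 := by omega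
    rw [show p = (p.1, p.1) from by ext <;> simp [this]]

-- the r > s half equals the r < s half
lemma gt_half (B : Int) (f : Int → Int) :
    ∑ p ∈ (pvSq B).filter (fun p => ¬ p.1 < p.2 ∧ p.2 < p.1), pvG B f p
      = ∑ p ∈ (pvSq B).filter (fun p => p.1 < p.2), pvG B f p := by
  refine Finset.sum_nbij' (i := fun p => (p.2, p.1)) (j := fun p => (p.2, p.1)) ?_ ?_ ?_ ?_ ?_
  · intro p hp
    simp only [Finset.mem_filter, mem_pvSq] at hp ⊢
    omega
  · intro p hp
    simp only [Finset.mem_filter, mem_pvSq] at hp ⊢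
    omega
  · intro p _; rfl
  · intro p _; rfl
  · intro p _
    simp only [pvG]
    rw [tf_swap]; ring

-- the scalar diagonal low part maps onto the P23 region
lemma diag_low_to_P23 (B : Int) (hB : 0 < B) (f : Int → Int) (F : Int → Int → Int) :
    ∑ r ∈ (pvS B).filter (fun r => tf B r r < r), F r (tf B r r)
      = ∑ p ∈ (pvSq B).filter (fun p => p.1 < p.2 ∧ tf B p.1 p.2 = p.2), F p.2 p.1 := by
  refine Finset.sum_nbij' (i := fun r => (tf B r r, r)) (j := fun p => p.2) ?_ ?_ ?_ ?_ ?_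
  · intro r hr
    simp only [Finset.mem_filter, mem_pvS] at hr
    simp only [Finset.mem_filter, mem_pvSq]
    have h1 := tf_nonneg hB r r
    refine ⟨⟨⟨h1, by omega⟩, ⟨hr.1.1, hr.1.2⟩⟩, hr.2, ?_⟩
    exact tf_rotate hB hr.1.1 hr.1.2
  · intro p hp
    simp only [Finset.mem_filter, mem_pvSq] at hp
    simp only [Finset.mem_filter, mem_pvS]
    obtain ⟨⟨⟨h10, h1B⟩, ⟨h20, h2B⟩⟩, hlt, heq⟩ := hp
    -- tf p.2 p.2 = p.1 : from B ∣ p.1 + p.2 + tf p.1 p.2 = p.1 + 2 p.2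
    have hd := tf_dvd hB p.1 p.2
    rw [heq] at hd
    have : tf B p.2 p.2 = p.1 := by
      rw [tf_eq_iff hB h10 h1B]
      rw [show p.2 + p.2 + p.1 = p.1 + p.2 + p.2 by ring]
      exact hd
    refine ⟨⟨h20, h2B⟩, by omega⟩
  · intro r _; rfl
  · intro p hp
    simp only [Finset.mem_filter, mem_pvSq] at hp
    obtain ⟨⟨⟨h10, h1B⟩, _⟩, _, heq⟩ := hp
    have hd := tf_dvd hB p.1 p.2
    rw [heq] at hd
    have h : tf B p.2 p.2 = p.1 := by
      rw [tf_eq_iff hB h10 h1B]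
      rw [show p.2 + p.2 + p.1 = p.1 + p.2 + p.2 by ring]
      exact hd
    ext <;> simp [h]
  · intro r _; rfl

lemma tf_rot2 {B r s : Int} (hB : 0 < B) (hs0 : 0 ≤ s) (hsB : s < B) :
    tf B r (tf B r s) = s := by
  rw [tf_eq_iff hB hs0 hsB]
  have := tf_dvd hB r s
  rw [show r + tf B r s + s = (r + s + tf B r s) by ring]
  exact this

-- region {r<s, r<t<s} maps onto the canonical D3 region
lemma mid_to_D3 (B : Int) (hB : 0 < B) (f : Int → Int) :
    ∑ p ∈ (pvSq B).filter
        (fun p => p.1 < p.2 ∧ tf B p.1 p.2 < p.2 ∧ p.1 < tf B p.1 p.2), pvG B f p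
      = pvD3 B f := by
  unfold pvD3
  refine Finset.sum_nbij' (i := fun p => (p.1, tf B p.1 p.2))
    (j := fun p => (p.1, tf B p.1 p.2)) ?_ ?_ ?_ ?_ ?_
  · intro p hp
    simp only [Finset.mem_filter, mem_pvSq] at hp ⊢
    obtain ⟨⟨⟨h10, h1B⟩, ⟨h20, h2B⟩⟩, hlt, htlt, hrt⟩ := hp
    have := tf_rot2 (r := p.1) hB h20 h2B
    refine ⟨⟨⟨h10, h1B⟩, ⟨tf_nonneg hB _ _, tf_lt hB _ _⟩⟩, hrt, ?_⟩
    rw [this]; exact htlt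
  · intro p hp
    simp only [Finset.mem_filter, mem_pvSq] at hp ⊢
    obtain ⟨⟨⟨h10, h1B⟩, ⟨h20, h2B⟩⟩, hlt, htgt⟩ := hp
    have := tf_rot2 (r := p.1) hB h20 h2B
    refine ⟨⟨⟨h10, h1B⟩, ⟨tf_nonneg hB _ _, tf_lt hB _ _⟩⟩, by omega, ?_, ?_⟩
    · rw [this]; exact htgt
    · rw [this]; exact hlt
  · intro p hp
    simp only [Finset.mem_filter, mem_pvSq] at hp
    have := tf_rot2 (r := p.1) hB hp.1.2.1 hp.1.2.2
    ext <;> simp [this]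
  · intro p hp
    simp only [Finset.mem_filter, mem_pvSq] at hp
    have := tf_rot2 (r := p.1) hB hp.1.2.1 hp.1.2.2
    ext <;> simp [this]
  · intro p hp
    simp only [Finset.mem_filter, mem_pvSq] at hp
    obtain ⟨⟨⟨h10, h1B⟩, ⟨h20, h2B⟩⟩, _⟩ := hp
    have := tf_rot2 (r := p.1) hB h20 h2B
    simp only [pvG, this]
    ring

-- region {r<s, t<r} maps onto the canonical D3 region
lemma low_to_D3 (B : Int) (hB : 0 < B) (f : Int → Int) :
    ∑ p ∈ (pvSq B).filter
        (fun p => p.1 < p.2 ∧ tf B p.1 p.2 < p.1), pvG B f p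
      = pvD3 B f := by
  unfold pvD3
  refine Finset.sum_nbij' (i := fun p => (tf B p.1 p.2, p.1))
    (j := fun p => (p.2, tf B p.1 p.2)) ?_ ?_ ?_ ?_ ?_
  · intro p hp
    simp only [Finset.mem_filter, mem_pvSq] at hp ⊢
    obtain ⟨⟨⟨h10, h1B⟩, ⟨h20, h2B⟩⟩, hlt, htlt⟩ := hp
    have hrot := tf_rotate (r := p.1) hB h20 h2B
    exact ⟨⟨⟨tf_nonneg hB _ _, tf_lt hB _ _⟩, ⟨h10, h1B⟩⟩, htlt, by omega⟩
  · intro p hp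
    simp only [Finset.mem_filter, mem_pvSq] at hp ⊢
    obtain ⟨⟨⟨h10, h1B⟩, ⟨h20, h2B⟩⟩, hlt, htgt⟩ := hp
    -- p = (r,s) with r<s<t; j p = (s,t); tf s t = r
    have hd := tf_dvd hB p.1 p.2
    have h1 : tf B p.2 (tf B p.1 p.2) = p.1 := by
      rw [tf_eq_iff hB h10 h1B]
      rw [show p.2 + tf B p.1 p.2 + p.1 = p.1 + p.2 + tf B p.1 p.2 by ring]
      exact hd
    exact ⟨⟨⟨h20, h2B⟩, ⟨tf_nonneg hB _ _, tf_lt hB _ _⟩⟩, htgt, by omega⟩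
  · intro p hp
    simp only [Finset.mem_filter, mem_pvSq] at hp
    obtain ⟨⟨⟨h10, h1B⟩, ⟨h20, h2B⟩⟩, hlt, htlt⟩ := hp
    have hrot := tf_rotate (r := p.1) hB h20 h2B
    ext <;> simp [hrot]
  · intro p hp
    simp only [Finset.mem_filter, mem_pvSq] at hp
    obtain ⟨⟨⟨h10, h1B⟩, ⟨h20, h2B⟩⟩, hlt, htgt⟩ := hp
    have hd := tf_dvd hB p.1 p.2
    have h1 : tf B p.2 (tf B p.1 p.2) = p.1 := by
      rw [tf_eq_iff hB h10 h1B]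
      rw [show p.2 + tf B p.1 p.2 + p.1 = p.1 + p.2 + tf B p.1 p.2 by ring]
      exact hd
    ext <;> simp [h1]
  · intro p hp
    simp only [Finset.mem_filter, mem_pvSq] at hp
    obtain ⟨⟨⟨h10, h1B⟩, ⟨h20, h2B⟩⟩, _⟩ := hp
    have hrot := tf_rotate (r := p.1) hB h20 h2B
    simp only [pvG, hrot]
    ring

-- region {r<s, t=r} maps onto the canonical P12 region
lemma te_to_P12 (B : Int) (hB : 0 < B) (f : Int → Int) :
    ∑ p ∈ (pvSq B).filter
        (fun p => p.1 < p.2 ∧ tf B p.1 p.2 = p.1), pvG B f p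
      = pvP12 B f := by
  unfold pvP12
  refine Finset.sum_nbij' (i := fun p => p.1) (j := fun r => (r, tf B r r)) ?_ ?_ ?_ ?_ ?_
  · intro p hp
    simp only [Finset.mem_filter, mem_pvSq] at hp
    obtain ⟨⟨⟨h10, h1B⟩, ⟨h20, h2B⟩⟩, hlt, hte⟩ := hp
    have hd := tf_dvd hB p.1 p.2
    rw [hte] at hd
    have h1 : tf B p.1 p.1 = p.2 := by
      rw [tf_eq_iff hB h20 h2B]
      rw [show p.1 + p.1 + p.2 = p.1 + p.2 + p.1 by ring]
      exact hd
    simp only [Finset.mem_filter, mem_pvS]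
    exact ⟨⟨h10, h1B⟩, by omega⟩
  · intro r hr
    simp only [Finset.mem_filter, mem_pvS] at hr
    simp only [Finset.mem_filter, mem_pvSq]
    obtain ⟨⟨h0, hB'⟩, hlt⟩ := hr
    have hd := tf_dvd hB r r
    have h1 : tf B r (tf B r r) = r := by
      rw [tf_eq_iff hB h0 hB']
      rw [show r + tf B r r + r = r + r + tf B r r by ring]
      exact hd
    exact ⟨⟨⟨h0, hB'⟩, ⟨tf_nonneg hB _ _, tf_lt hB _ _⟩⟩, hlt, h1⟩
  · intro p hp
    simp only [Finset.mem_filter, mem_pvSq] at hp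
    obtain ⟨⟨⟨h10, h1B⟩, ⟨h20, h2B⟩⟩, hlt, hte⟩ := hp
    have hd := tf_dvd hB p.1 p.2
    rw [hte] at hd
    have h1 : tf B p.1 p.1 = p.2 := by
      rw [tf_eq_iff hB h20 h2B]
      rw [show p.1 + p.1 + p.2 = p.1 + p.2 + p.1 by ring]
      exact hd
    ext <;> simp [h1]
  · intro r _; rfl
  · intro p hp
    simp only [Finset.mem_filter, mem_pvSq] at hp
    obtain ⟨⟨⟨h10, h1B⟩, ⟨h20, h2B⟩⟩, hlt, hte⟩ := hp
    have hd := tf_dvd hB p.1 p.2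
    rw [hte] at hd
    have h1 : tf B p.1 p.1 = p.2 := by
      rw [tf_eq_iff hB h20 h2B]
      rw [show p.1 + p.1 + p.2 = p.1 + p.2 + p.1 by ring]
      exact hd
    simp only [pvG, hte, h1]
    ring

-- generic split of a filtered sum by a further predicate
lemma split_sum' {α : Type} (s : Finset α) (p q : α → Prop)
    [DecidablePred p] [DecidablePred q] (F : α → Int) :
    ∑ x ∈ s.filter p, F x
      = ∑ x ∈ s.filter (fun a => p a ∧ q a), F x
        + ∑ x ∈ s.filter (fun a => p a ∧ ¬ q a), F x := by
  rw [← Finset.sum_filter_add_sum_filter_not (s.filter p) q F,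
    Finset.filter_filter, Finset.filter_filter]

lemma filter_iff {α : Type} (s : Finset α) (p q : α → Prop)
    [DecidablePred p] [DecidablePred q] (h : ∀ x, p x ↔ q x) :
    s.filter p = s.filter q := by
  ext x; simp only [Finset.mem_filter, h]

lemma lt_region (B : Int) (hB : 0 < B) (f : Int → Int) :
    ∑ p ∈ (pvSq B).filter (fun p => p.1 < p.2), pvG B f p
      = 3 * pvD3 B f + pvP23 B f + pvP12 B f := by
  rw [split_sum' (pvSq B) (fun p => p.1 < p.2) (fun p => p.2 < tf B p.1 p.2) (pvG B f)]
  rw [split_sum' (pvSq B) (fun a : Int × Int => a.1 < a.2 ∧ ¬ a.2 < tf B a.1 a.2)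
    (fun p : Int × Int => tf B p.1 p.2 = p.2) (pvG B f)]
  rw [split_sum' (pvSq B)
    (fun a : Int × Int => (a.1 < a.2 ∧ ¬ a.2 < tf B a.1 a.2) ∧ ¬ tf B a.1 a.2 = a.2)
    (fun p : Int × Int => p.1 < tf B p.1 p.2) (pvG B f)]
  rw [split_sum' (pvSq B)
    (fun a : Int × Int => ((a.1 < a.2 ∧ ¬ a.2 < tf B a.1 a.2) ∧ ¬ tf B a.1 a.2 = a.2)
      ∧ ¬ a.1 < tf B a.1 a.2)
    (fun p : Int × Int => tf B p.1 p.2 = p.1) (pvG B f)]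
  -- region b : p.1 < p.2 = t   = P23 (value rewrite below)
  have hb : ∑ p ∈ (pvSq B).filter
        (fun a : Int × Int => (a.1 < a.2 ∧ ¬ a.2 < tf B a.1 a.2) ∧ tf B a.1 a.2 = a.2),
        pvG B f p = pvP23 B f := by
    rw [filter_iff _ _ (fun p : Int × Int => p.1 < p.2 ∧ tf B p.1 p.2 = p.2)
      (fun x => by constructor <;> (intro h; omega))]
    unfold pvP23
    refine Finset.sum_congr rfl ?_
    intro p hp
    simp only [Finset.mem_filter, mem_pvSq] at hp
    simp only [pvG, hp.2.2]
  -- region c : p.1 < t < p.2  → D3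
  have hc : ∑ p ∈ (pvSq B).filter
        (fun a : Int × Int => ((a.1 < a.2 ∧ ¬ a.2 < tf B a.1 a.2) ∧ ¬ tf B a.1 a.2 = a.2)
          ∧ a.1 < tf B a.1 a.2), pvG B f p = pvD3 B f := by
    rw [filter_iff _ _
      (fun p : Int × Int => p.1 < p.2 ∧ tf B p.1 p.2 < p.2 ∧ p.1 < tf B p.1 p.2)
      (fun x => by constructor <;> (intro h; omega))]
    exact mid_to_D3 B hB f
  -- region d : t = p.1 < p.2  → P12
  have hd : ∑ p ∈ (pvSq B).filter
        (fun a : Int × Int => (((a.1 < a.2 ∧ ¬ a.2 < tf B a.1 a.2) ∧ ¬ tf B a.1 a.2 = a.2)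
          ∧ ¬ a.1 < tf B a.1 a.2) ∧ tf B a.1 a.2 = a.1), pvG B f p = pvP12 B f := by
    rw [filter_iff _ _
      (fun p : Int × Int => p.1 < p.2 ∧ tf B p.1 p.2 = p.1)
      (fun x => by constructor <;> (intro h; omega))]
    exact te_to_P12 B hB f
  -- region e : t < p.1 < p.2  → D3
  have he : ∑ p ∈ (pvSq B).filter
        (fun a : Int × Int => (((a.1 < a.2 ∧ ¬ a.2 < tf B a.1 a.2) ∧ ¬ tf B a.1 a.2 = a.2)
          ∧ ¬ a.1 < tf B a.1 a.2) ∧ ¬ tf B a.1 a.2 = a.1), pvG B f p = pvD3 B f := by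
    rw [filter_iff _ _
      (fun p : Int × Int => p.1 < p.2 ∧ tf B p.1 p.2 < p.1)
      (fun x => by constructor <;> (intro h; omega))]
    exact low_to_D3 B hB f
  rw [hb, hc, hd, he]
  unfold pvD3
  ring

lemma T_eq (B : Int) (hB : 0 < B) (f : Int → Int) :
    ∑ r ∈ pvS B, ∑ s ∈ pvS B, f r * f s * f (tf B r s)
      = 6 * pvD3 B f + 3 * pvP12 B f + 3 * pvP23 B f + pvE3 B f := by
  have hprod : ∑ p ∈ pvSq B, pvG B f p
      = ∑ r ∈ pvS B, ∑ s ∈ pvS B, f r * f s * f (tf B r s) := by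
    unfold pvSq pvG
    rw [Finset.sum_product]
  rw [← hprod]
  rw [← Finset.sum_filter_add_sum_filter_not (pvSq B) (fun p => p.1 < p.2) (pvG B f)]
  rw [split_sum' (pvSq B) (fun p : Int × Int => ¬ p.1 < p.2) (fun p : Int × Int => p.2 < p.1)
    (pvG B f)]
  rw [gt_half B f, lt_region B hB f]
  rw [diag_collapse B f (pvG B f)]
  -- diagonal: split by position of tf r r relative to r
  rw [← Finset.sum_filter_add_sum_filter_not (pvS B) (fun r => r < tf B r r)
    (fun r => pvG B f (r, r))]
  rw [split_sum' (pvS B) (fun r : Int => ¬ r < tf B r r) (fun r : Int => tf B r r = r)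
    (fun r => pvG B f (r, r))]
  have hd1 : ∑ r ∈ (pvS B).filter (fun r => r < tf B r r), pvG B f (r, r) = pvP12 B f := by
    unfold pvP12
    exact Finset.sum_congr rfl (fun r _ => by simp [pvG])
  have hd2 : ∑ r ∈ (pvS B).filter
      (fun a : Int => ¬ a < tf B a a ∧ tf B a a = a), pvG B f (r, r) = pvE3 B f := by
    rw [filter_iff _ _ (fun r : Int => tf B r r = r)
      (fun x => by constructor <;> (intro h; omega))]
    unfold pvE3
    refine Finset.sum_congr rfl ?_
    intro r hr
    simp only [Finset.mem_filter] at hr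
    simp [pvG, hr.2]
  have hd3 : ∑ r ∈ (pvS B).filter
      (fun a : Int => ¬ a < tf B a a ∧ ¬ tf B a a = a), pvG B f (r, r) = pvP23 B f := by
    rw [filter_iff _ _ (fun r : Int => tf B r r < r)
      (fun x => by constructor <;> (intro h; omega))]
    have := diag_low_to_P23 B hB f (fun r t => f r * f r * f t)
    simp only [pvG] at *
    rw [this]
    unfold pvP23
    exact Finset.sum_congr rfl (fun p _ => by ring)
  rw [hd1, hd2, hd3]
  ring

lemma U_eq (B : Int) (hB : 0 < B) (f : Int → Int) :
    ∑ r ∈ pvS B, f r * f (tf B r r) = pvQ12 B f + pvE2 B f + pvQ23 B f := by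
  rw [← Finset.sum_filter_add_sum_filter_not (pvS B) (fun r => r < tf B r r)
    (fun r => f r * f (tf B r r))]
  rw [split_sum' (pvS B) (fun r : Int => ¬ r < tf B r r) (fun r : Int => tf B r r = r)
    (fun r => f r * f (tf B r r))]
  have h2 : ∑ r ∈ (pvS B).filter (fun a : Int => ¬ a < tf B a a ∧ tf B a a = a),
      f r * f (tf B r r) = pvE2 B f := by
    rw [filter_iff _ _ (fun r : Int => tf B r r = r)
      (fun x => by constructor <;> (intro h; omega))]
    unfold pvE2
    refine Finset.sum_congr rfl ?_
    intro r hr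
    simp only [Finset.mem_filter] at hr
    rw [hr.2]
  have h3 : ∑ r ∈ (pvS B).filter (fun a : Int => ¬ a < tf B a a ∧ ¬ tf B a a = a),
      f r * f (tf B r r) = pvQ23 B f := by
    rw [filter_iff _ _ (fun r : Int => tf B r r < r)
      (fun x => by constructor <;> (intro h; omega))]
    rw [diag_low_to_P23 B hB f (fun r t => f r * f t)]
    unfold pvQ23
    exact Finset.sum_congr rfl (fun p _ => by ring)
  rw [h2, h3]
  unfold pvQ12
  ring

lemma six_dvd_prod (x : Int) : (6:ℤ) ∣ x * (x - 1) * (x - 2) := by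
  have h : ((x * (x - 1) * (x - 2) : Int) : ZMod 6) = 0 := by
    have : ∀ y : ZMod 6, y * (y - 1) * (y - 2) = 0 := by decide
    push_cast
    exact this (x : ZMod 6)
  exact_mod_cast (ZMod.intCast_zmod_eq_zero_iff_dvd _ 6).mp h

lemma two_dvd_prod (x : Int) : (2:ℤ) ∣ x * (x - 1) := by
  have h : ((x * (x - 1) : Int) : ZMod 2) = 0 := by
    have : ∀ y : ZMod 2, y * (y - 1) = 0 := by decide
    push_cast
    exact this (x : ZMod 2)
  exact_mod_cast (ZMod.intCast_zmod_eq_zero_iff_dvd _ 2).mp h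

lemma fd_exact {k x : Int} (hk0 : 0 < k) (h : k ∣ x) :
    k * PySem.Int.floordiv x k = x := by
  rw [PySem.Int.floordiv_eq_ediv_of_pos hk0]
  exact Int.mul_ediv_cancel' h

def pvW (B : Int) (f : Int → Int) (i j : Int) : Int :=
  if tf B i j < j then 0
  else if i = j ∧ tf B i j = j then PySem.Int.floordiv (f i * (f i - 1) * (f i - 2)) 6
  else if i = j then PySem.Int.floordiv (f i * (f i - 1) * f (tf B i j)) 2
  else if i = tf B i j then 0
  else if j = tf B i j then PySem.Int.floordiv (f j * (f j - 1) * f i) 2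
  else f i * f j * f (tf B i j)

lemma W_eq (B : Int) (hB : 0 < B) (f : Int → Int) :
    6 * (∑ i ∈ pvS B, ∑ j ∈ Finset.Ico i B, pvW B f i j)
      = 6 * pvD3 B f + (3 * pvP12 B f - 3 * pvQ12 B f)
        + (3 * pvP23 B f - 3 * pvQ23 B f)
        + (pvE3 B f - 3 * pvE2 B f + 2 * pvE1 B f) := by
  -- inner Ico as a filtered sum over pvS
  have hio : ∀ i ∈ pvS B, ∑ j ∈ Finset.Ico i B, pvW B f i j
      = ∑ j ∈ pvS B, if i ≤ j then pvW B f i j else 0 := by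
    intro i hi
    rw [mem_pvS] at hi
    rw [← Finset.sum_filter]
    refine Finset.sum_congr ?_ (fun _ _ => rfl)
    ext x
    simp only [Finset.mem_Ico, Finset.mem_filter, mem_pvS]
    omega
  rw [Finset.sum_congr rfl hio]
  rw [← Finset.sum_product']
  have hsq : (pvS B) ×ˢ (pvS B) = pvSq B := rfl
  rw [hsq, ← Finset.sum_filter]
  -- split off the zero region tf < p.2
  rw [split_sum' (pvSq B) (fun p : Int × Int => p.1 ≤ p.2)
    (fun p : Int × Int => tf B p.1 p.2 < p.2) (fun p => pvW B f p.1 p.2)]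
  have hz : ∑ p ∈ (pvSq B).filter
      (fun a : Int × Int => a.1 ≤ a.2 ∧ tf B a.1 a.2 < a.2), pvW B f p.1 p.2 = 0 := by
    refine Finset.sum_eq_zero ?_
    intro p hp
    simp only [Finset.mem_filter] at hp
    rw [pvW, if_pos hp.2.2]
  -- split diagonal / off-diagonal
  rw [split_sum' (pvSq B)
    (fun a : Int × Int => a.1 ≤ a.2 ∧ ¬ tf B a.1 a.2 < a.2)
    (fun p : Int × Int => p.1 = p.2) (fun p => pvW B f p.1 p.2)]
  -- diagonal collapses to a scalar sum
  have hdc : ∑ p ∈ (pvSq B).filter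
      (fun a : Int × Int => (a.1 ≤ a.2 ∧ ¬ tf B a.1 a.2 < a.2) ∧ a.1 = a.2),
      pvW B f p.1 p.2
      = ∑ r ∈ (pvS B).filter (fun r => ¬ tf B r r < r), pvW B f r r := by
    refine Finset.sum_nbij' (i := fun p => p.1) (j := fun r => (r, r)) ?_ ?_ ?_ ?_ ?_
    · intro p hp
      simp only [Finset.mem_filter, mem_pvSq] at hp
      obtain ⟨⟨⟨h10, h1B⟩, _⟩, ⟨_, hnt⟩, heq⟩ := hp
      simp only [Finset.mem_filter, mem_pvS]
      rw [heq] at hnt ⊢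
      exact ⟨⟨by omega, by omega⟩, hnt⟩
    · intro r hr
      simp only [Finset.mem_filter, mem_pvS] at hr
      simp only [Finset.mem_filter, mem_pvSq]
      exact ⟨⟨⟨hr.1.1, hr.1.2⟩, ⟨hr.1.1, hr.1.2⟩⟩, ⟨le_refl _, hr.2⟩, trivial⟩
    · intro p hp
      simp only [Finset.mem_filter, mem_pvSq] at hp
      ext <;> simp [hp.2.2]
    · intro r _; rfl
    · intro p hp
      simp only [Finset.mem_filter, mem_pvSq] at hp
      rw [show p = (p.1, p.1) from by ext <;> simp [hp.2.2]]
  rw [hz, hdc]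
  -- scalar diagonal: split by tf r r = r
  rw [split_sum' (pvS B) (fun r : Int => ¬ tf B r r < r) (fun r : Int => tf B r r = r)
    (fun r => pvW B f r r)]
  -- off-diagonal: split by tf = p.2
  rw [split_sum' (pvSq B)
    (fun a : Int × Int => (a.1 ≤ a.2 ∧ ¬ tf B a.1 a.2 < a.2) ∧ ¬ a.1 = a.2)
    (fun p : Int × Int => tf B p.1 p.2 = p.2) (fun p => pvW B f p.1 p.2)]
  -- distribute the factor 6
  simp only [mul_add, mul_zero, Finset.mul_sum]
  -- E-region
  have hE : ∑ r ∈ (pvS B).filter (fun a : Int => ¬ tf B a a < a ∧ tf B a a = a),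
      6 * pvW B f r r
      = pvE3 B f - 3 * pvE2 B f + 2 * pvE1 B f := by
    rw [filter_iff _ _ (fun r : Int => tf B r r = r)
      (fun x => by constructor <;> (intro h; omega))]
    have hval : ∀ r ∈ (pvS B).filter (fun r : Int => tf B r r = r),
        6 * pvW B f r r = f r * f r * f r - 3 * (f r * f r) + 2 * f r := by
      intro r hr
      simp only [Finset.mem_filter] at hr
      rw [pvW, if_neg (by omega), if_pos ⟨rfl, hr.2⟩, fd_exact (by norm_num) (six_dvd_prod (f r))]
      ring
    rw [Finset.sum_congr rfl hval]
    unfold pvE3 pvE2 pvE1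
    rw [Finset.sum_add_distrib, Finset.sum_sub_distrib, ← Finset.mul_sum, ← Finset.mul_sum]
  -- P12-region
  have hP12 : ∑ r ∈ (pvS B).filter (fun a : Int => ¬ tf B a a < a ∧ ¬ tf B a a = a),
      6 * pvW B f r r = 3 * pvP12 B f - 3 * pvQ12 B f := by
    rw [filter_iff _ _ (fun r : Int => r < tf B r r)
      (fun x => by constructor <;> (intro h; omega))]
    have hval : ∀ r ∈ (pvS B).filter (fun r : Int => r < tf B r r),
        6 * pvW B f r r = 3 * (f r * f r * f (tf B r r)) - 3 * (f r * f (tf B r r)) := by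
      intro r hr
      simp only [Finset.mem_filter] at hr
      rw [pvW, if_neg (by omega), if_neg (by omega), if_pos rfl]
      have h2 := fd_exact (k := 2) (by norm_num) (two_dvd_prod (f r))
      calc 6 * PySem.Int.floordiv (f r * (f r - 1) * f (tf B r r)) 2
          = 3 * (2 * PySem.Int.floordiv (f r * (f r - 1) * f (tf B r r)) 2) := by ring
        _ = 3 * (f r * (f r - 1) * f (tf B r r)) := by
            rw [fd_exact (by norm_num) (Dvd.dvd.mul_right (two_dvd_prod (f r)) _)]
        _ = 3 * (f r * f r * f (tf B r r)) - 3 * (f r * f (tf B r r)) := by ring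
    rw [Finset.sum_congr rfl hval]
    unfold pvP12 pvQ12
    rw [Finset.sum_sub_distrib, ← Finset.mul_sum, ← Finset.mul_sum]
  -- P23-region
  have hP23 : ∑ p ∈ (pvSq B).filter
      (fun a : Int × Int => ((a.1 ≤ a.2 ∧ ¬ tf B a.1 a.2 < a.2) ∧ ¬ a.1 = a.2)
        ∧ tf B a.1 a.2 = a.2),
      6 * pvW B f p.1 p.2 = 3 * pvP23 B f - 3 * pvQ23 B f := by
    rw [filter_iff _ _ (fun p : Int × Int => p.1 < p.2 ∧ tf B p.1 p.2 = p.2)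
      (fun x => by constructor <;> (intro h; omega))]
    have hval : ∀ p ∈ (pvSq B).filter
        (fun p : Int × Int => p.1 < p.2 ∧ tf B p.1 p.2 = p.2),
        6 * pvW B f p.1 p.2
          = 3 * (f p.1 * f p.2 * f p.2) - 3 * (f p.1 * f p.2) := by
      intro p hp
      simp only [Finset.mem_filter] at hp
      rw [pvW, if_neg (by omega), if_neg (by omega), if_neg (by omega), if_neg (by omega),
        if_pos hp.2.2.symm]
      calc 6 * PySem.Int.floordiv (f p.2 * (f p.2 - 1) * f p.1) 2
          = 3 * (2 * PySem.Int.floordiv (f p.2 * (f p.2 - 1) * f p.1) 2) := by ring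
        _ = 3 * (f p.2 * (f p.2 - 1) * f p.1) := by
            rw [fd_exact (by norm_num) (Dvd.dvd.mul_right (two_dvd_prod (f p.2)) _)]
        _ = 3 * (f p.1 * f p.2 * f p.2) - 3 * (f p.1 * f p.2) := by ring
    rw [Finset.sum_congr rfl hval]
    unfold pvP23 pvQ23
    rw [Finset.sum_sub_distrib, ← Finset.mul_sum, ← Finset.mul_sum]
  -- D3-region
  have hD3 : ∑ p ∈ (pvSq B).filter
      (fun a : Int × Int => ((a.1 ≤ a.2 ∧ ¬ tf B a.1 a.2 < a.2) ∧ ¬ a.1 = a.2)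
        ∧ ¬ tf B a.1 a.2 = a.2),
      6 * pvW B f p.1 p.2 = 6 * pvD3 B f := by
    rw [filter_iff _ _ (fun p : Int × Int => p.1 < p.2 ∧ p.2 < tf B p.1 p.2)
      (fun x => by constructor <;> (intro h; omega))]
    unfold pvD3
    rw [Finset.mul_sum]
    refine Finset.sum_congr rfl ?_
    intro p hp
    simp only [Finset.mem_filter] at hp
    rw [pvW, if_neg (by omega), if_neg (by omega), if_neg (by omega), if_neg (by omega),
      if_neg (by omega)]
    rfl
  rw [hE, hP12, hP23, hD3]
  ring

lemma key_identity (B : Int) (hB : 0 < B) (f : Int → Int) :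
    (∑ r ∈ pvS B, ∑ s ∈ pvS B, f r * f s * f (tf B r s))
      - 3 * (∑ r ∈ pvS B, f r * f (tf B r r))
      + 2 * (∑ r ∈ pvS B, if tf B r r = r then f r else 0)
      = 6 * (∑ i ∈ pvS B, ∑ j ∈ Finset.Ico i B, pvW B f i j) := by
  rw [T_eq B hB f, U_eq B hB f, W_eq B hB f]
  have hV : (∑ r ∈ pvS B, if tf B r r = r then f r else 0) = pvE1 B f := by
    unfold pvE1
    rw [Finset.sum_filter]
  rw [hV]
  ring

-- ---- freq loop: A's index loop with in-place mutation equals B's element fold ----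
lemma freq_loop (B : Int) (tail : List Int) : ∀ (pre fr : List Int),
    (PySem.List.pyRange (pre.length : Int) ((pre.length : Int) + tail.length) 1).foldl
      (solveStep B) (pre ++ tail, fr)
    = (pre ++ tail.map (fun a => PySem.Int.mod a B), tail.foldl (altCount B) fr) := by
  induction tail with
  | nil =>
    intro pre fr
    simp [PySem.List.pyRange_one]
  | cons a tl ih =>
    intro pre fr
    rw [PySem.List.pyRange_one_cons (by simp only [List.length_cons]; push_cast; omega)]
    rw [List.foldl_cons]
    have hget : PySem.List.pyGetD (pre ++ a :: tl) (pre.length : Int) 0 = a := by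
      simp [PySem.List.pyGetD_natCast, List.getD_eq_getElem?_getD]
    have hset : ∀ v, PySem.List.pySetD (pre ++ a :: tl) (pre.length : Int) v
        = pre ++ v :: tl := by
      intro v
      rw [PySem.List.pySetD_natCast]
      rw [List.set_append_right _ _ (le_refl pre.length)]
      simp
    have hstep : solveStep B (pre ++ a :: tl, fr) (pre.length : Int)
        = (pre ++ (PySem.Int.mod a B) :: tl, altCount B fr a) := by
      simp only [solveStep, altCount, hget, hset]
    rw [hstep]
    have harr : (pre.length : Int) + 1 = ((pre ++ [PySem.Int.mod a B]).length : Int) := by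
      simp
    have harr2 : (pre.length : Int) + ((a :: tl).length : Int)
        = ((pre ++ [PySem.Int.mod a B]).length : Int) + (tl.length : Int) := by
      simp only [List.length_cons, List.length_append, List.length_nil]
      push_cast; omega
    rw [show pre ++ (PySem.Int.mod a B) :: tl = (pre ++ [PySem.Int.mod a B]) ++ tl by simp]
    rw [harr2, harr]
    rw [ih (pre ++ [PySem.Int.mod a B]) (altCount B fr a)]
    simp [altCount]

-- ---- bridging the Python mod expressions to tf ----
lemma rem_eq {B : Int} (hB : 0 < B) (i j : Int) : solveRem B i j = tf B i j := by
  unfold solveRem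
  rw [PySem.Int.mod_eq_emod_of_pos hB, PySem.Int.mod_eq_emod_of_pos hB]
  have h : tf B i j = (B - (i + j).emod B).emod B := by
    have hk0 : (0:ℤ) ≤ (B - (i + j).emod B).emod B := Int.emod_nonneg _ (by omega)
    have hkB : (B - (i + j).emod B).emod B < B := Int.emod_lt_of_pos _ hB
    rw [tf_eq_iff hB hk0 hkB]
    have h1 := Int.emod_add_mul_ediv (i + j) B
    have h2 := Int.emod_add_mul_ediv (B - (i + j).emod B) B
    exact ⟨(i + j) / B - (B - (i + j).emod B) / B + 1, by linear_combination h2 - h1⟩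
  exact h.symm

lemma mod_neg_eq_tf {B : Int} (hB : 0 < B) (r s : Int) :
    PySem.Int.mod (-(r + s)) B = tf B r s := by
  rw [PySem.Int.mod_eq_emod_of_pos hB]; rfl

lemma mod_neg2_eq_tf {B : Int} (hB : 0 < B) (r : Int) :
    PySem.Int.mod (-2 * r) B = tf B r r := by
  rw [PySem.Int.mod_eq_emod_of_pos hB, show (-2 * r : Int) = -(r + r) by ring]; rfl

lemma mod3_iff_tf {B r : Int} (hB : 0 < B) (hr0 : 0 ≤ r) (hrB : r < B) :
    PySem.Int.mod (3 * r) B = 0 ↔ tf B r r = r := by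
  rw [PySem.Int.mod_eq_zero_iff_dvd, tf_eq_iff hB hr0 hrB,
    show (r + r + r : Int) = 3 * r by ring]

lemma fd6_cancel (x : Int) : PySem.Int.floordiv (6 * x) 6 = x := by
  rw [PySem.Int.floordiv_eq_ediv_of_pos (by norm_num)]
  exact Int.mul_ediv_cancel_left x (by norm_num)

-- ---- A's loop nest as a double Finset sum ----
lemma inner_eq {B : Int} (hB : 0 < B) (L : List Int) (i ans j : Int) :
    solveInner B L i ans j = ans + pvW B (fun x => PySem.List.pyGetD L x 0) i j := by
  unfold solveInner pvW
  rw [rem_eq hB]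
  split_ifs <;> ring

lemma inner_fold {B : Int} (hB : 0 < B) (L : List Int) (i : Int) (ans : Int) :
    (PySem.List.pyRange i B 1).foldl (solveInner B L i) ans
      = ans + ∑ j ∈ Finset.Ico i B, pvW B (fun x => PySem.List.pyGetD L x 0) i j := by
  have h1 : (PySem.List.pyRange i B 1).foldl (solveInner B L i) ans
      = (PySem.List.pyRange i B 1).foldl
          (fun ans j => ans + pvW B (fun x => PySem.List.pyGetD L x 0) i j) ans :=
    PySem.List.foldl_congr_mem _ _ _ _ (fun acc x _ => inner_eq hB L i acc x)
  rw [h1, PySem.List.foldl_add, sum_pyRange]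

lemma ans_eq {B : Int} (hB : 0 < B) (L : List Int) :
    (PySem.List.pyRange 0 B 1).foldl
      (fun ans i => (PySem.List.pyRange i B 1).foldl (solveInner B L i) ans) 0
      = ∑ i ∈ Finset.Ico 0 B, ∑ j ∈ Finset.Ico i B,
          pvW B (fun x => PySem.List.pyGetD L x 0) i j := by
  have h1 : (PySem.List.pyRange 0 B 1).foldl
      (fun ans i => (PySem.List.pyRange i B 1).foldl (solveInner B L i) ans) 0
      = (PySem.List.pyRange 0 B 1).foldl
          (fun ans i => ans + ∑ j ∈ Finset.Ico i B,
            pvW B (fun x => PySem.List.pyGetD L x 0) i j) 0 :=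
    PySem.List.foldl_congr_mem _ _ _ _ (fun acc x _ => inner_fold hB L x acc)
  rw [h1, PySem.List.foldl_add, sum_pyRange]
  rw [zero_add]

-- ---- B's loop as the three Finset sums ----
lemma altStep_eq {B : Int} (hB : 0 < B) (L : List Int) (st : Int × Int × Int) (r : Int)
    (hr0 : 0 ≤ r) (hrB : r < B) :
    altStep B L st r
      = (st.1 + ∑ s ∈ Finset.Ico 0 B,
            PySem.List.pyGetD L r 0 * PySem.List.pyGetD L s 0
              * PySem.List.pyGetD L (tf B r s) 0,
         st.2.1 + PySem.List.pyGetD L r 0 * PySem.List.pyGetD L (tf B r r) 0,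
         st.2.2 + (if tf B r r = r then PySem.List.pyGetD L r 0 else 0)) := by
  simp only [altStep]
  have ht : (PySem.List.pyRange 0 B 1).foldl
      (fun t s => t + PySem.List.pyGetD L r 0 * PySem.List.pyGetD L s 0 *
        PySem.List.pyGetD L (PySem.Int.mod (-(r + s)) B) 0) st.1
      = st.1 + ∑ s ∈ Finset.Ico 0 B,
          PySem.List.pyGetD L r 0 * PySem.List.pyGetD L s 0
            * PySem.List.pyGetD L (tf B r s) 0 := by
    have h1 : (PySem.List.pyRange 0 B 1).foldl
        (fun t s => t + PySem.List.pyGetD L r 0 * PySem.List.pyGetD L s 0 *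
          PySem.List.pyGetD L (PySem.Int.mod (-(r + s)) B) 0) st.1
        = (PySem.List.pyRange 0 B 1).foldl
            (fun t s => t + PySem.List.pyGetD L r 0 * PySem.List.pyGetD L s 0 *
              PySem.List.pyGetD L (tf B r s) 0) st.1 :=
      PySem.List.foldl_congr_mem _ _ _ _ (fun acc x _ => by rw [mod_neg_eq_tf hB])
    rw [h1, PySem.List.foldl_add, sum_pyRange]
  rw [ht, mod_neg2_eq_tf hB]
  have hv : (if PySem.Int.mod (3 * r) B = 0
        then st.2.2 + PySem.List.pyGetD L r 0 else st.2.2)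
      = st.2.2 + (if tf B r r = r then PySem.List.pyGetD L r 0 else 0) := by
    by_cases h : tf B r r = r
    · rw [if_pos ((mod3_iff_tf hB hr0 hrB).mpr h), if_pos h]
    · rw [if_neg (fun hc => h ((mod3_iff_tf hB hr0 hrB).mp hc)), if_neg h, add_zero]
  rw [hv]

lemma foldl_triple (l : List Int) (gt gu gv : Int → Int) : ∀ (init : Int × Int × Int),
    l.foldl (fun st r => (st.1 + gt r, st.2.1 + gu r, st.2.2 + gv r)) init
      = (init.1 + (l.map gt).sum, init.2.1 + (l.map gu).sum, init.2.2 + (l.map gv).sum) := by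
  induction l with
  | nil => intro init; simp
  | cons a tl ih =>
    intro init
    rw [List.foldl_cons, ih]
    simp only [List.map_cons, List.sum_cons, Prod.mk.injEq]
    exact ⟨by ring, by ring, by ring⟩

lemma alt_fold {B : Int} (hB : 0 < B) (L : List Int) :
    (PySem.List.pyRange 0 B 1).foldl (altStep B L) (0, 0, 0)
      = (∑ r ∈ Finset.Ico 0 B, ∑ s ∈ Finset.Ico 0 B,
            PySem.List.pyGetD L r 0 * PySem.List.pyGetD L s 0
              * PySem.List.pyGetD L (tf B r s) 0,
         ∑ r ∈ Finset.Ico 0 B,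
            PySem.List.pyGetD L r 0 * PySem.List.pyGetD L (tf B r r) 0,
         ∑ r ∈ Finset.Ico 0 B,
            (if tf B r r = r then PySem.List.pyGetD L r 0 else 0)) := by
  have h1 : (PySem.List.pyRange 0 B 1).foldl (altStep B L) (0, 0, 0)
      = (PySem.List.pyRange 0 B 1).foldl
          (fun (st : Int × Int × Int) r =>
            (st.1 + ∑ s ∈ Finset.Ico 0 B,
                PySem.List.pyGetD L r 0 * PySem.List.pyGetD L s 0
                  * PySem.List.pyGetD L (tf B r s) 0,
             st.2.1 + PySem.List.pyGetD L r 0 * PySem.List.pyGetD L (tf B r r) 0,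
             st.2.2 + (if tf B r r = r then PySem.List.pyGetD L r 0 else 0))) (0, 0, 0) := by
    refine PySem.List.foldl_congr_mem _ _ _ _ ?_
    intro acc x hx
    rw [PySem.List.mem_pyRange_one] at hx
    exact altStep_eq hB L acc x hx.1 hx.2
  rw [h1, foldl_triple, sum_pyRange, sum_pyRange, sum_pyRange]
  simp only [zero_add]

-- ---- main equivalence for B ≥ 1 ----
lemma solve_eq_pos (A : List Int) (B : Int) (hB : 1 ≤ B) : Solve A B = Solve_alt A B := by
  have hB0 : 0 < B := hB
  simp only [Solve, Solve_alt]
  have hinit : (PySem.List.pyRange 0 B 1).map (fun _ => (0 : Int))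
      = List.replicate B.toNat 0 := by
    rw [PySem.List.pyRange_one, List.map_map]
    rw [show ((fun _ => (0:Int)) ∘ fun k : Nat => (0:Int) + (k:Int)) = fun _ => (0:Int) from rfl]
    rw [List.map_const']
    simp
  rw [hinit]
  have hst := freq_loop B A [] (List.replicate B.toNat 0)
  simp only [List.length_nil, Nat.cast_zero, zero_add, List.nil_append] at hst
  rw [hst]
  rw [ans_eq hB0, alt_fold hB0]
  have KI := key_identity B hB0 (fun x => PySem.List.pyGetD (A.foldl (altCount B) (List.replicate B.toNat 0)) x 0)
  rw [pvS_eq] at KI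
  rw [KI, fd6_cancel]

-- ---- both return 0 when B <= 0 and the list is empty ----
lemma solve_eq_empty (B : Int) (hB : B ≤ 0) : Solve [] B = Solve_alt [] B := by
  have h0 : (B - 0).toNat = 0 := by omega
  have hBt : B.toNat = 0 := by omega
  simp only [Solve, Solve_alt, List.length_nil, Nat.cast_zero, PySem.List.pyRange_one, h0, hBt,
    Int.sub_zero, List.range_zero, List.map_nil, List.foldl_nil, List.replicate_zero]
  decide

-- ===== VERDICT (by name: the statement is the Claim_ definition above) =====
theorem Solve_spec : Claim_equal_Solve := by
  intro A B _ hpre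
  unfold Spec_Solve
  by_cases hB : 1 ≤ B
  · exact solve_eq_pos A B hB
  · have hA : A = [] := by
      rcases hpre with h | h
      · exact absurd h hB
      · exact h
    subst hA
    exact solve_eq_empty B (by omega)
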